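-- pv_equiv track=rewrite | github.com/Lau-Tsz-Yueng/University-Projects | polynomial solver-1.0/tests/runtests.py | first_differing_lines
-- ===== SOURCE A (Python) =====
-- def first_differing_lines(s1, s2):
--     assert s1 != s2
--     lines1 = s1.split('\n')
--     lines2 = s2.split('\n')
--     for n in range(min(len(lines1), len(lines2))):
--         if lines1[n] != lines2[n]:
--             return n, lines1[n], lines2[n]
--     if len(lines1) < len(lines2):
--         n = len(lines1)
--         return n, '', lines2[n]
--     elif len(lines1) > len(lines2):
--         n = len(lines2)
--         return n, lines1[n], ''
-- ===== SOURCE B (Python) =====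
-- def first_differing_lines(s1, s2):
--     assert s1 != s2
--     # Character-level: find the longest common prefix, then reconstruct the
--     # first differing line around its end -- no line-by-line comparison loop.
--     m = min(len(s1), len(s2))
--     k = 0
--     while k < m and s1[k] == s2[k]:
--         k += 1
--     pieces = s1[:k].split('\n')   # the common prefix, cut into lines
--     n = len(pieces) - 1           # lines 0..n-1 are fully common
--     frag = pieces[-1]             # common start of line n
--     if k == m:                    # one whole string is a prefix of the other
--         if len(s1) > len(s2):
--             if s1[k] == '\n':     # line n is common too; extra text starts a new line
--                 e = s1.find('\n', k + 1)
--                 return n + 1, (s1[k + 1:] if e == -1 else s1[k + 1:e]), ''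
--         else:
--             if s2[k] == '\n':
--                 e = s2.find('\n', k + 1)
--                 return n + 1, '', (s2[k + 1:] if e == -1 else s2[k + 1:e])
--     e1 = s1.find('\n', k)
--     e2 = s2.find('\n', k)
--     line1 = frag + (s1[k:] if e1 == -1 else s1[k:e1])
--     line2 = frag + (s2[k:] if e2 == -1 else s2[k:e2])
--     return n, line1, line2
-- ===== Notes on version B (the rewrite author's own statement) =====
-- stated objective: alternative
-- what changed: B drops A's split-then-compare-lines-by-index loop entirely: it finds the longest common character prefix of the two raw strings, counts the lines it spans, and reconstructs the first differing line around its end (with a special case when one string is a prefix of the other).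
import Mathlib
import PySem

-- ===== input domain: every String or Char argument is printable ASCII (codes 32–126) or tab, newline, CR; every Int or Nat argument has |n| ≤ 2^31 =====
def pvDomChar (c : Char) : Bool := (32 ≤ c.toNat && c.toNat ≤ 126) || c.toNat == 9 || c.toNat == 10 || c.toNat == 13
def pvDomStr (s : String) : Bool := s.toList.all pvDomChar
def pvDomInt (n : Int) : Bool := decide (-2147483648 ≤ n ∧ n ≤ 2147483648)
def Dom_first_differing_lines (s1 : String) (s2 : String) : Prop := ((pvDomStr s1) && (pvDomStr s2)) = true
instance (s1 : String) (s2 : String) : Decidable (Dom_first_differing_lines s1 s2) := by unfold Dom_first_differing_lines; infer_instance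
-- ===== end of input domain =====

-- B replaces A's line-by-line comparison of the two split line lists by a character-level
-- algorithm: it finds the longest common prefix of the raw strings and reconstructs the
-- first differing line around its end (objective: alternative, same cost).
-- A asserts s1 != s2 (AssertionError on equal strings, hence Pre_); under the assert the
-- implicit-None fallthrough of A is unreachable and both ports use the dummy (0, "", "").

-- ===== PORT A =====
-- for n in range(min(len(lines1), len(lines2))): compare lines1[n], lines2[n]
-- (structural recursion consuming both line lists with the index counter n; none = loop done)
def pvALoop : List (List Char) → List (List Char) → Int → Option (Int × List Char × List Char)
  | a :: t1, b :: t2, n => if a ≠ b then some (n, a, b) else pvALoop t1 t2 (n + 1)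
  | _, _, _ => none

-- body after the two splits: the range(min) loop, then the two length-comparison branches
def pvABody (lines1 lines2 : List (List Char)) : Int × List Char × List Char :=
  match pvALoop lines1 lines2 0 with
  | some r => r
  | none =>
    if lines1.length < lines2.length then
      ((lines1.length : Int), [], PySem.List.pyGetD lines2 (lines1.length : Int) [])
    else if lines2.length < lines1.length then
      ((lines2.length : Int), PySem.List.pyGetD lines1 (lines2.length : Int) [], [])
    else (0, [], [])   -- Python's implicit None; unreachable when s1 ≠ s2

def first_differing_lines (s1 : String) (s2 : String) : Int × String × String :=
  let r := pvABody (PySem.Chars.splitOn s1.toList ['\n']) (PySem.Chars.splitOn s2.toList ['\n'])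
  (r.1, String.ofList r.2.1, String.ofList r.2.2)

-- ===== PORT B =====
-- while k < m and s1[k] == s2[k]: k += 1   (the same loop as structural recursion over
-- both char lists; the recursion stops exactly when an index reaches min length or chars differ)
def pvKLoop : List Char → List Char → Nat
  | a :: t1, b :: t2 => if a = b then pvKLoop t1 t2 + 1 else 0
  | _, _ => 0

-- the shared fall-through tail of B: e1/e2 = s.find('\n', k), lines = frag + s[k:e]
def pvBFall (l1 l2 : List Char) (k : Nat) (n : Int) (frag : List Char) : Int × List Char × List Char :=
  let e1 := PySem.Chars.findFrom l1 ['\n'] (k : Int) none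
  let e2 := PySem.Chars.findFrom l2 ['\n'] (k : Int) none
  (n, frag ++ (if e1 = -1 then PySem.List.slice l1 (some (k : Int)) none
               else PySem.List.slice l1 (some (k : Int)) (some e1)),
      frag ++ (if e2 = -1 then PySem.List.slice l2 (some (k : Int)) none
               else PySem.List.slice l2 (some (k : Int)) (some e2)))

-- Source B's body on the char level; s1[k]/s2[k] is ported as pyGet? compared with some '\n'
-- (the index is in range whenever the branch is reached on s1 ≠ s2)
def pvBBody (l1 l2 : List Char) : Int × List Char × List Char :=
  let m := min l1.length l2.length
  let k := pvKLoop l1 l2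
  let pieces := PySem.Chars.splitOn (PySem.List.slice l1 none (some (k : Int))) ['\n']
  let n : Int := (pieces.length : Int) - 1
  let frag := PySem.List.pyGetD pieces (-1) []
  if k = m then
    if l2.length < l1.length then
      if PySem.List.pyGet? l1 (k : Int) = some '\n' then
        let e := PySem.Chars.findFrom l1 ['\n'] ((k : Int) + 1) none
        (n + 1, (if e = -1 then PySem.List.slice l1 (some ((k : Int) + 1)) none
                 else PySem.List.slice l1 (some ((k : Int) + 1)) (some e)), [])
      else pvBFall l1 l2 k n frag
    else
      if PySem.List.pyGet? l2 (k : Int) = some '\n' then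
        let e := PySem.Chars.findFrom l2 ['\n'] ((k : Int) + 1) none
        (n + 1, [], (if e = -1 then PySem.List.slice l2 (some ((k : Int) + 1)) none
                     else PySem.List.slice l2 (some ((k : Int) + 1)) (some e)))
      else pvBFall l1 l2 k n frag
  else pvBFall l1 l2 k n frag

def first_differing_lines_alt (s1 : String) (s2 : String) : Int × String × String :=
  let r := pvBBody s1.toList s2.toList
  (r.1, String.ofList r.2.1, String.ofList r.2.2)

-- ===== PRECONDITION & SPEC =====
-- A's 'assert s1 != s2' raises AssertionError on equal strings; Pre_ excludes exactly those.
def Pre_first_differing_lines (s1 : String) (s2 : String) : Prop := s1 ≠ s2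
instance (s1 : String) (s2 : String) : Decidable (Pre_first_differing_lines s1 s2) := by unfold Pre_first_differing_lines; infer_instance
def pvWitness_first_differing_lines : String × String := ("a\nb", "a\nc")

def Spec_first_differing_lines (s1 : String) (s2 : String) (out : Int × String × String) : Prop := out = first_differing_lines_alt s1 s2
instance (s1 : String) (s2 : String) (out : Int × String × String) : Decidable (Spec_first_differing_lines s1 s2 out) := by unfold Spec_first_differing_lines; infer_instance

-- ===== CLAIM (what is proved, stated in full; the proofs are below) =====
def Claim_equal_first_differing_lines : Prop := ∀ (s1 : String) (s2 : String), Dom_first_differing_lines s1 s2 → Pre_first_differing_lines s1 s2 → Spec_first_differing_lines s1 s2 (first_differing_lines s1 s2)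

-- ===== LEMMAS AND PROOFS =====

-- clean split on '\n' (proof-side model of s.split('\n'))
def pvSplitNl : List Char → List (List Char)
  | [] => [[]]
  | c :: t =>
    if c = '\n' then [] :: pvSplitNl t
    else match pvSplitNl t with
      | [] => [[c]]          -- unreachable: pvSplitNl is never []
      | h :: tl => (c :: h) :: tl

-- first index of '\n' (proof-side model of find)
def pvIdxNl : List Char → Option Nat
  | [] => none
  | c :: t => if c = '\n' then some 0 else (pvIdxNl t).map (· + 1)

-- the first line of a string: up to the first '\n'
def pvExtract (l : List Char) : List Char := l.takeWhile (· ≠ '\n')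

-- clean form of B's body
def pvCleanB (l1 l2 : List Char) : Int × List Char × List Char :=
  let k := pvKLoop l1 l2
  let P := pvSplitNl (l1.take k)
  let n : Int := (P.length : Int) - 1
  let frag := P.getLastD []
  if k = min l1.length l2.length then
    if l2.length < l1.length then
      if (l1.drop k).head? = some '\n' then (n + 1, pvExtract (l1.drop (k + 1)), [])
      else (n, frag ++ pvExtract (l1.drop k), frag ++ pvExtract (l2.drop k))
    else
      if (l2.drop k).head? = some '\n' then (n + 1, [], pvExtract (l2.drop (k + 1)))
      else (n, frag ++ pvExtract (l1.drop k), frag ++ pvExtract (l2.drop k))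
  else (n, frag ++ pvExtract (l1.drop k), frag ++ pvExtract (l2.drop k))

lemma pvSplitNl_ne_nil (l : List Char) : pvSplitNl l ≠ [] := by
  cases l with
  | nil => simp [pvSplitNl]
  | cons c t =>
    simp only [pvSplitNl]
    split
    · simp
    · split <;> simp

lemma pvSplitNl_cons_nl (t : List Char) : pvSplitNl ('\n' :: t) = [] :: pvSplitNl t := by
  simp [pvSplitNl]

lemma pvSplitNl_cons_ne (c : Char) (t : List Char) (hc : c ≠ '\n') :
    pvSplitNl (c :: t) = (c :: (pvSplitNl t).headD []) :: (pvSplitNl t).tail := by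
  simp only [pvSplitNl, if_neg hc]
  cases h : pvSplitNl t with
  | nil => exact absurd h (pvSplitNl_ne_nil t)
  | cons h' tl => simp

-- join is a left inverse of split, hence split is injective
def pvJoinNl : List (List Char) → List Char
  | [] => []
  | [x] => x
  | x :: xs => x ++ '\n' :: pvJoinNl xs

lemma pvJoinNl_splitNl (l : List Char) : pvJoinNl (pvSplitNl l) = l := by
  induction l with
  | nil => rfl
  | cons c t ih =>
    by_cases hc : c = '\n'
    · subst hc
      rw [pvSplitNl_cons_nl]
      cases h : pvSplitNl t with
      | nil => exact absurd h (pvSplitNl_ne_nil t)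
      | cons h' tl => rw [h] at ih; simpa [pvJoinNl] using ih
    · rw [pvSplitNl_cons_ne c t hc]
      cases h : pvSplitNl t with
      | nil => exact absurd h (pvSplitNl_ne_nil t)
      | cons h' tl =>
        rw [h] at ih
        cases tl with
        | nil => simpa [pvJoinNl] using ih
        | cons x xs => simpa [pvJoinNl] using ih

lemma pvSplitNl_inj {l1 l2 : List Char} (h : pvSplitNl l1 = pvSplitNl l2) : l1 = l2 := by
  have := congrArg pvJoinNl h
  rwa [pvJoinNl_splitNl, pvJoinNl_splitNl] at this

lemma pvSplitNl_headD (l : List Char) : (pvSplitNl l).headD [] = pvExtract l := by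
  induction l with
  | nil => rfl
  | cons c t ih =>
    by_cases hc : c = '\n'
    · subst hc; rw [pvSplitNl_cons_nl]; simp [pvExtract]
    · rw [pvSplitNl_cons_ne c t hc]
      simp only [List.headD_cons, ih]
      simp [pvExtract, hc]

-- PySem.Chars.splitOn on the single separator '\n' is pvSplitNl
lemma pvSplitOn_go (fuel : Nat) : ∀ (l cur : List Char) (acc : List (List Char)), l.length < fuel →
    PySem.Chars.splitOn.go ['\n'] fuel l cur acc =
      acc.reverse ++ (cur.reverse ++ (pvSplitNl l).headD []) :: (pvSplitNl l).tail := by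
  induction fuel with
  | zero => intro l cur acc h; omega
  | succ f ih =>
    intro l cur acc h
    cases l with
    | nil =>
      simp [PySem.Chars.splitOn.go, pvSplitNl]
    | cons c rest =>
      by_cases hc : c = '\n'
      · subst hc
        rw [show PySem.Chars.splitOn.go ['\n'] (f + 1) ('\n' :: rest) cur acc =
              PySem.Chars.splitOn.go ['\n'] f rest [] (cur.reverse :: acc) by
            simp [PySem.Chars.splitOn.go, List.isPrefixOf]]
        rw [ih rest [] (cur.reverse :: acc) (by simp at h; omega)]
        rw [pvSplitNl_cons_nl]
        cases hs : pvSplitNl rest with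
        | nil => exact absurd hs (pvSplitNl_ne_nil rest)
        | cons h' tl => simp
      · rw [show PySem.Chars.splitOn.go ['\n'] (f + 1) (c :: rest) cur acc =
              PySem.Chars.splitOn.go ['\n'] f rest (c :: cur) acc by
            simp [PySem.Chars.splitOn.go, List.isPrefixOf, Ne.symm hc]]
        rw [ih rest (c :: cur) acc (by simp at h; omega)]
        rw [pvSplitNl_cons_ne c rest hc]
        simp

lemma pvSplitOn_eq (l : List Char) : PySem.Chars.splitOn l ['\n'] = pvSplitNl l := by
  rw [PySem.Chars.splitOn, pvSplitOn_go (l.length + 1) l [] [] (by omega)]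
  cases hs : pvSplitNl l with
  | nil => exact absurd hs (pvSplitNl_ne_nil l)
  | cons h' tl => simp

-- PySem.Chars.find / findFrom on '\n' via pvIdxNl
lemma pvFind_go (l : List Char) : ∀ (i : Nat),
    PySem.Chars.find.go ['\n'] l i =
      (match pvIdxNl l with | none => (-1 : Int) | some j => ((i + j : Nat) : Int)) := by
  induction l with
  | nil => intro i; simp [PySem.Chars.find.go, pvIdxNl]
  | cons c t ih =>
    intro i
    by_cases hc : c = '\n'
    · subst hc
      simp [PySem.Chars.find.go, List.isPrefixOf, pvIdxNl]
    · rw [show PySem.Chars.find.go ['\n'] (c :: t) i = PySem.Chars.find.go ['\n'] t (i + 1) by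
          simp [PySem.Chars.find.go, List.isPrefixOf, Ne.symm hc]]
      rw [ih (i + 1)]
      simp only [pvIdxNl, if_neg hc]
      cases h : pvIdxNl t with
      | none => simp
      | some j =>
        simp only [Option.map_some]
        push_cast
        ring

lemma pvFind_eq (l : List Char) :
    PySem.Chars.find l ['\n'] = (match pvIdxNl l with | none => (-1 : Int) | some j => (j : Int)) := by
  rw [PySem.Chars.find, pvFind_go l 0]
  cases h : pvIdxNl l <;> simp

lemma pvIdxNl_lt_length (l : List Char) (j : Nat) (h : pvIdxNl l = some j) : j < l.length := by
  induction l generalizing j with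
  | nil => simp [pvIdxNl] at h
  | cons c t ih =>
    by_cases hc : c = '\n'
    · subst hc
      simp [pvIdxNl] at h
      simp only [List.length_cons]
      omega
    · simp only [pvIdxNl, if_neg hc] at h
      cases h2 : pvIdxNl t with
      | none => rw [h2] at h; simp at h
      | some j' =>
        rw [h2] at h
        simp at h
        have := ih j' h2
        simp only [List.length_cons]
        omega

lemma pvFindFrom_eq (l : List Char) (k : Nat) :
    PySem.Chars.findFrom l ['\n'] (k : Int) none =
      (match pvIdxNl (l.drop k) with | none => (-1 : Int) | some j => ((k + j : Nat) : Int)) := by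
  rcases le_or_gt k l.length with hk | hk
  · rw [PySem.Chars.findFrom_natCast l ['\n'] k hk, pvFind_eq]
    cases h : pvIdxNl (l.drop k) with
    | none => simp
    | some j =>
      show (if (j : Int) = -1 then (-1 : Int) else (k : Int) + (j : Int)) = ((k + j : Nat) : Int)
      rw [if_neg (by omega)]
      push_cast
      ring
  · rw [List.drop_eq_nil_of_le hk.le]
    simp only [PySem.Chars.findFrom]
    rw [if_pos (by omega)]
    rfl

-- slices with nonneg bounds
lemma pvSlice_to (l : List Char) (k : Nat) : PySem.List.slice l none (some (k : Int)) = l.take k := by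
  simp only [PySem.List.slice, PySem.List.clampIdx,
    if_neg (show ¬((k : Int) < 0) by omega), Int.toNat_natCast, Nat.sub_zero, List.drop_zero]
  rcases le_or_gt k l.length with h | h
  · rw [min_eq_left h]
  · rw [min_eq_right h.le, List.take_length, List.take_of_length_le h.le]

lemma pvSlice_from (l : List Char) (k : Nat) : PySem.List.slice l (some (k : Int)) none = l.drop k := by
  simp only [PySem.List.slice, PySem.List.clampIdx,
    if_neg (show ¬((k : Int) < 0) by omega), Int.toNat_natCast]
  rcases le_or_gt k l.length with h | h
  · rw [min_eq_left h]
    exact List.take_of_length_le (by simp)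
  · rw [min_eq_right h.le, Nat.sub_self, List.take_zero, List.drop_eq_nil_of_le h.le]

lemma pvSlice_both (l : List Char) (k e : Nat) (hk : k ≤ e) (he : e ≤ l.length) :
    PySem.List.slice l (some (k : Int)) (some (e : Int)) = (l.drop k).take (e - k) := by
  simp only [PySem.List.slice, PySem.List.clampIdx,
    if_neg (show ¬((k : Int) < 0) by omega), if_neg (show ¬((e : Int) < 0) by omega),
    Int.toNat_natCast]
  rw [min_eq_left (le_trans hk he), min_eq_left he]

-- the sliced-out piece s[k:e] / s[k:] is exactly the first line of s[k:]
lemma pvExtract_eq_idx (l : List Char) :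
    (match pvIdxNl l with | none => l | some j => l.take j) = pvExtract l := by
  induction l with
  | nil => rfl
  | cons c t ih =>
    by_cases hc : c = '\n'
    · subst hc; simp [pvIdxNl, pvExtract]
    · simp only [pvIdxNl, if_neg hc]
      cases h : pvIdxNl t with
      | none =>
        rw [h] at ih
        simp only [Option.map_none]
        simpa [pvExtract, List.takeWhile_cons, hc] using ih
      | some j =>
        rw [h] at ih
        simp only [Option.map_some]
        simpa [pvExtract, List.takeWhile_cons, hc, List.take_succ_cons] using ih

-- pvKLoop bounds
-- ===== B port = clean form =====
lemma pvExtract_of_none {l : List Char} (h : pvIdxNl l = none) : l = pvExtract l := by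
  have := pvExtract_eq_idx l
  rwa [h] at this

lemma pvExtract_of_some {l : List Char} {j : Nat} (h : pvIdxNl l = some j) :
    l.take j = pvExtract l := by
  have := pvExtract_eq_idx l
  rwa [h] at this

lemma pvPyGetD_neg_one (P : List (List Char)) (h : P ≠ []) :
    PySem.List.pyGetD P (-1) [] = P.getLastD [] := by
  have hn : P.length ≠ 0 := by simpa using h
  simp only [PySem.List.pyGetD, PySem.List.pyGet?, PySem.List.pyIdx?]
  rw [if_neg (by omega), if_pos (by omega)]
  simp only [Option.bind_some]
  rw [List.getLastD_eq_getLast?, List.getLast?_eq_getElem?]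
  norm_num

-- 'frag + (s[k:] if e == -1 else s[k:e])' with e = s.find('\n', k) is the first line of s[k:]
lemma pvFindFrom_none (l : List Char) (k : Nat) (h : pvIdxNl (l.drop k) = none) :
    PySem.Chars.findFrom l ['\n'] (k : Int) none = -1 := by
  rw [pvFindFrom_eq, h]

lemma pvFindFrom_some (l : List Char) (k j : Nat) (h : pvIdxNl (l.drop k) = some j) :
    PySem.Chars.findFrom l ['\n'] (k : Int) none = ((k + j : Nat) : Int) := by
  rw [pvFindFrom_eq, h]

lemma pvTail (l : List Char) (k : Nat) :
    (if PySem.Chars.findFrom l ['\n'] (k : Int) none = -1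
     then PySem.List.slice l (some (k : Int)) none
     else PySem.List.slice l (some (k : Int)) (some (PySem.Chars.findFrom l ['\n'] (k : Int) none)))
      = pvExtract (l.drop k) := by
  cases h : pvIdxNl (l.drop k) with
  | none =>
    rw [pvFindFrom_none l k h, if_pos rfl, pvSlice_from]
    exact pvExtract_of_none h
  | some j =>
    have hj : j < (l.drop k).length := pvIdxNl_lt_length _ j h
    rw [List.length_drop] at hj
    rw [pvFindFrom_some l k j h, if_neg (by omega),
      pvSlice_both l k (k + j) (by omega) (by omega), Nat.add_sub_cancel_left]
    exact pvExtract_of_some h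

lemma pvBBody_eq_clean (l1 l2 : List Char) : pvBBody l1 l2 = pvCleanB l1 l2 := by
  have hc1 : ((pvKLoop l1 l2 : Int) + 1) = ((pvKLoop l1 l2 + 1 : Nat) : Int) := by push_cast; ring
  simp only [pvBBody, pvCleanB, pvBFall, pvSlice_to, pvSplitOn_eq,
    pvPyGetD_neg_one (pvSplitNl (l1.take (pvKLoop l1 l2))) (pvSplitNl_ne_nil _),
    PySem.List.pyGet?_natCast, ← List.head?_drop, hc1, pvTail]

-- ===== step lemmas for the main induction =====
def pvBump (r : Int × List Char × List Char) : Int × List Char × List Char := (r.1 + 1, r.2)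
def pvStepC (c : Char) (r : Int × List Char × List Char) : Int × List Char × List Char :=
  if r.1 = 0 then (0, c :: r.2.1, c :: r.2.2) else r

lemma pvALoop_shift (L1 L2 : List (List Char)) (n : Int) :
    pvALoop L1 L2 n = (pvALoop L1 L2 0).map (fun r => (r.1 + n, r.2)) := by
  induction L1 generalizing L2 n with
  | nil => simp [pvALoop]
  | cons a t1 ih =>
    cases L2 with
    | nil => simp [pvALoop]
    | cons b t2 =>
      by_cases hab : a = b
      · subst hab
        simp only [pvALoop, ne_eq, not_true_eq_false, if_false]
        rw [ih t2 (n + 1), ih t2 (0 + 1)]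
        cases pvALoop t1 t2 0 with
        | none => simp
        | some r => simp; ring
      · simp [pvALoop, hab]

lemma pvALoop_nonneg (L1 : List (List Char)) : ∀ (L2 : List (List Char)) (r : Int × List Char × List Char),
    pvALoop L1 L2 0 = some r → 0 ≤ r.1 := by
  induction L1 with
  | nil => intro L2 r h; simp [pvALoop] at h
  | cons a t1 ih =>
    intro L2 r h
    cases L2 with
    | nil => simp [pvALoop] at h
    | cons b t2 =>
      by_cases hab : a = b
      · subst hab
        simp only [pvALoop, ne_eq, not_true_eq_false, if_false] at h
        rw [pvALoop_shift t1 t2 (0 + 1)] at h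
        cases h2 : pvALoop t1 t2 0 with
        | none => rw [h2] at h; simp at h
        | some r' =>
          rw [h2] at h
          simp only [Option.map_some, Option.some.injEq] at h
          cases h
          have := ih t2 r' h2
          simp
          omega
      · simp only [pvALoop, if_pos (by simpa using hab)] at h
        cases h
        simp

lemma pvALoop_none_eq (L1 : List (List Char)) : ∀ (L2 : List (List Char)),
    pvALoop L1 L2 0 = none → L1.length = L2.length → L1 = L2 := by
  induction L1 with
  | nil =>
    intro L2 h hl
    cases L2 with
    | nil => rfl
    | cons b t2 => simp at hl
  | cons a t1 ih =>
    intro L2 h hl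
    cases L2 with
    | nil => simp at hl
    | cons b t2 =>
      by_cases hab : a = b
      · subst hab
        simp only [pvALoop, ne_eq, not_true_eq_false, if_false] at h
        rw [pvALoop_shift t1 t2 (0 + 1), Option.map_eq_none_iff] at h
        rw [ih t2 h (by simpa using hl)]
      · simp [pvALoop, hab] at h

lemma pvABody_step_nl (L1 L2 : List (List Char)) (h : L1 ≠ L2) :
    pvABody ([] :: L1) ([] :: L2) = pvBump (pvABody L1 L2) := by
  unfold pvABody
  simp only [pvALoop, ne_eq, not_true_eq_false, if_false]
  rw [pvALoop_shift L1 L2 (0 + 1)]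
  cases hr : pvALoop L1 L2 0 with
  | some r => simp [pvBump]
  | none =>
    simp only [Option.map_none, List.length_cons]
    have hne : L1.length ≠ L2.length := fun he => h (pvALoop_none_eq L1 L2 hr he)
    rcases lt_trichotomy L1.length L2.length with hlt | heq | hgt
    · rw [if_pos (show L1.length + 1 < L2.length + 1 by omega), if_pos hlt]
      simp only [pvBump, Prod.mk.injEq]
      refine ⟨by push_cast; ring, trivial, ?_⟩
      rw [PySem.List.pyGetD_natCast, PySem.List.pyGetD_natCast, List.getD_cons_succ]
    · exact absurd heq hne
    · rw [if_neg (show ¬ (L1.length + 1 < L2.length + 1) by omega),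
        if_pos (show L2.length + 1 < L1.length + 1 by omega),
        if_neg (show ¬ (L1.length < L2.length) by omega), if_pos hgt]
      simp only [pvBump, Prod.mk.injEq]
      refine ⟨by push_cast; ring, ?_, trivial⟩
      rw [PySem.List.pyGetD_natCast, PySem.List.pyGetD_natCast, List.getD_cons_succ]

lemma pvStepC_ne_zero (c : Char) (r : Int × List Char × List Char) (h : r.1 ≠ 0) :
    pvStepC c r = r := by simp [pvStepC, h]

lemma pvStepC_zero (c : Char) (r : Int × List Char × List Char) (h : r.1 = 0) :
    pvStepC c r = (0, c :: r.2.1, c :: r.2.2) := by simp [pvStepC, h]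

lemma pvABody_step_c (c : Char) (h1 h2 : List Char) (T1 T2 : List (List Char))
    (h : h1 :: T1 ≠ h2 :: T2) :
    pvABody ((c :: h1) :: T1) ((c :: h2) :: T2) = pvStepC c (pvABody (h1 :: T1) (h2 :: T2)) := by
  by_cases hh : h1 = h2
  · subst hh
    have hT : T1 ≠ T2 := by simpa using h
    unfold pvABody
    simp only [pvALoop, ne_eq, not_true_eq_false, if_false, List.length_cons]
    rw [pvALoop_shift T1 T2 (0 + 1)]
    cases hr : pvALoop T1 T2 0 with
    | some r =>
      have hnn := pvALoop_nonneg T1 T2 r hr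
      simp only [Option.map_some]
      rw [pvStepC_ne_zero _ _ (by simp; omega)]
    | none =>
      have hne : T1.length ≠ T2.length := fun he => hT (pvALoop_none_eq T1 T2 hr he)
      simp only [Option.map_none]
      rcases lt_trichotomy T1.length T2.length with hlt | heq | hgt
      · rw [if_pos (show T1.length + 1 < T2.length + 1 by omega),
          if_pos (show T1.length + 1 < T2.length + 1 by omega)]
        rw [pvStepC_ne_zero _ _ (by simp; omega)]
        simp only [Prod.mk.injEq, true_and]
        rw [PySem.List.pyGetD_natCast, PySem.List.pyGetD_natCast, List.getD_cons_succ,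
          List.getD_cons_succ]
      · exact absurd heq hne
      · rw [if_neg (show ¬ (T1.length + 1 < T2.length + 1) by omega),
          if_neg (show ¬ (T1.length + 1 < T2.length + 1) by omega),
          if_pos (show T2.length + 1 < T1.length + 1 by omega),
          if_pos (show T2.length + 1 < T1.length + 1 by omega)]
        rw [pvStepC_ne_zero _ _ (by simp; omega)]
        simp only [Prod.mk.injEq, true_and, and_true]
        rw [PySem.List.pyGetD_natCast, PySem.List.pyGetD_natCast, List.getD_cons_succ,
          List.getD_cons_succ]
  · have hcc : (c :: h1) ≠ (c :: h2) := by simpa using hh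
    unfold pvABody
    simp only [pvALoop, ne_eq, hcc, hh, not_false_eq_true, if_true]
    rw [pvStepC_zero _ _ rfl]

lemma pvCleanB_step_nl (t1 t2 : List Char) :
    pvCleanB ('\n' :: t1) ('\n' :: t2) = pvBump (pvCleanB t1 t2) := by
  have hk : pvKLoop ('\n' :: t1) ('\n' :: t2) = pvKLoop t1 t2 + 1 := by simp [pvKLoop]
  unfold pvCleanB
  rw [hk]
  simp only [List.take_succ_cons, pvSplitNl_cons_nl, List.getLastD_cons, List.drop_succ_cons,
    List.length_cons]
  rw [show min (t1.length + 1) (t2.length + 1) = min t1.length t2.length + 1 by omega]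
  simp only [add_left_inj, add_lt_add_iff_right, pvBump]
  split_ifs <;> exact Prod.ext (by push_cast; ring) rfl

lemma pvCleanB_step_c (c : Char) (t1 t2 : List Char) (hc : c ≠ '\n') :
    pvCleanB (c :: t1) (c :: t2) = pvStepC c (pvCleanB t1 t2) := by
  have hk : pvKLoop (c :: t1) (c :: t2) = pvKLoop t1 t2 + 1 := by simp [pvKLoop]
  unfold pvCleanB
  rw [hk]
  simp only [List.take_succ_cons, List.drop_succ_cons, List.length_cons]
  rw [pvSplitNl_cons_ne c _ hc,
    show min (t1.length + 1) (t2.length + 1) = min t1.length t2.length + 1 by omega]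
  simp only [add_left_inj, add_lt_add_iff_right]
  cases hP : pvSplitNl (t1.take (pvKLoop t1 t2)) with
  | nil => exact absurd hP (pvSplitNl_ne_nil _)
  | cons hh tl =>
    simp only [List.headD_cons, List.tail_cons, List.length_cons, List.getLastD_cons]
    cases tl with
    | nil =>
      simp only [List.getLastD_nil, List.length_nil]
      split_ifs
      all_goals norm_num [pvStepC]
    | cons x xs =>
      simp only [List.getLastD_cons, List.length_cons]
      split_ifs
      all_goals rw [pvStepC_ne_zero]
      all_goals first
        | rfl
        | (simp; omega)

-- ===== main induction =====
lemma pvHeadD_extract (l : List Char) {a : List Char} {T : List (List Char)}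
    (h : pvSplitNl l = a :: T) : a = pvExtract l := by
  have := pvSplitNl_headD l
  rw [h] at this
  simpa using this

lemma pvSplit_decomp (l : List Char) :
    (pvSplitNl l).headD [] :: (pvSplitNl l).tail = pvSplitNl l := by
  cases h : pvSplitNl l with
  | nil => exact absurd h (pvSplitNl_ne_nil l)
  | cons a T => simp

lemma pvExtract_cons_nl (t : List Char) : pvExtract ('\n' :: t) = [] := by
  simp [pvExtract]

lemma pvExtract_cons (c : Char) (t : List Char) (hc : c ≠ '\n') :
    pvExtract (c :: t) = c :: pvExtract t := by
  simp [pvExtract, hc]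

lemma pvExtract_cons_ne {c d : Char} (t1 t2 : List Char) (h : c ≠ d) :
    pvExtract (c :: t1) ≠ pvExtract (d :: t2) := by
  by_cases hc : c = '\n' <;> by_cases hd : d = '\n'
  · exact absurd (hc.trans hd.symm) h
  · subst hc; rw [pvExtract_cons_nl, pvExtract_cons d t2 hd]; simp
  · subst hd; rw [pvExtract_cons_nl, pvExtract_cons c t1 hc]; simp
  · rw [pvExtract_cons c t1 hc, pvExtract_cons d t2 hd]; simp [h]

lemma pvABody_head_ne (l1 l2 : List Char) (h : pvExtract l1 ≠ pvExtract l2) :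
    pvABody (pvSplitNl l1) (pvSplitNl l2) = (0, pvExtract l1, pvExtract l2) := by
  cases h1 : pvSplitNl l1 with
  | nil => exact absurd h1 (pvSplitNl_ne_nil l1)
  | cons a T1 =>
    cases h2 : pvSplitNl l2 with
    | nil => exact absurd h2 (pvSplitNl_ne_nil l2)
    | cons b T2 =>
      have ha := pvHeadD_extract l1 h1
      have hb := pvHeadD_extract l2 h2
      have hab : a ≠ b := by rw [ha, hb]; exact h
      unfold pvABody
      simp only [pvALoop, ne_eq, hab, not_false_eq_true, if_true]
      rw [ha, hb]

lemma pvMain (l1 : List Char) : ∀ l2 : List Char, l1 ≠ l2 →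
    pvABody (pvSplitNl l1) (pvSplitNl l2) = pvCleanB l1 l2 := by
  induction l1 with
  | nil =>
    intro l2 h
    cases l2 with
    | nil => exact absurd rfl h
    | cons d t2 =>
      by_cases hd : d = '\n'
      · subst hd
        -- A side: [[]] vs [] :: split t2, a bumped empty-vs-S body
        rw [show pvSplitNl [] = [([] : List Char)] from rfl, pvSplitNl_cons_nl,
          show [([] : List Char)] = [] :: ([] : List (List Char)) from rfl,
          pvABody_step_nl [] (pvSplitNl t2) (Ne.symm (pvSplitNl_ne_nil t2))]
        cases hS : pvSplitNl t2 with
        | nil => exact absurd hS (pvSplitNl_ne_nil t2)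
        | cons a T =>
          have ha := pvHeadD_extract t2 hS
          have hA : pvABody [] (a :: T) = (0, [], a) := by
            unfold pvABody
            simp [pvALoop, PySem.List.pyGetD, PySem.List.pyGet?, PySem.List.pyIdx?]
          rw [hA]
          -- B side
          unfold pvCleanB
          simp only [show pvKLoop [] ('\n' :: t2) = 0 from rfl, List.take_zero, List.drop_zero,
            List.length_nil, List.length_cons, List.head?_cons,
            show pvSplitNl [] = [([] : List Char)] from rfl]
          rw [if_pos (by omega), if_neg (by omega), if_pos trivial]
          rw [ha]
          simp only [pvBump, List.drop_succ_cons, List.drop_zero]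
          exact Prod.ext (by norm_num) rfl
      · -- first line of s2 already differs from the lone empty line of s1
        have hx : pvExtract [] ≠ pvExtract (d :: t2) := by
          rw [pvExtract_cons d t2 hd]; simp [pvExtract]
        rw [pvABody_head_ne [] (d :: t2) hx]
        unfold pvCleanB
        simp only [show pvKLoop [] (d :: t2) = 0 from rfl, List.take_zero, List.drop_zero,
          List.length_nil, List.length_cons, List.head?_cons,
          show pvSplitNl [] = [([] : List Char)] from rfl]
        rw [if_pos (by omega), if_neg (by omega), if_neg (by simpa using hd)]
        simp only [show ([([] : List Char)]).getLastD [] = [] from rfl, List.nil_append]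
        exact Prod.ext (by norm_num) rfl
  | cons c t1 ih =>
    intro l2 h
    cases l2 with
    | nil =>
      by_cases hc : c = '\n'
      · subst hc
        rw [pvSplitNl_cons_nl,
          show pvSplitNl [] = [([] : List Char)] from rfl,
          show [([] : List Char)] = [] :: ([] : List (List Char)) from rfl,
          pvABody_step_nl (pvSplitNl t1) [] (pvSplitNl_ne_nil t1)]
        cases hS : pvSplitNl t1 with
        | nil => exact absurd hS (pvSplitNl_ne_nil t1)
        | cons a T =>
          have ha := pvHeadD_extract t1 hS
          have hA : pvABody (a :: T) [] = (0, a, []) := by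
            unfold pvABody
            simp [pvALoop, PySem.List.pyGetD, PySem.List.pyGet?, PySem.List.pyIdx?]
          rw [hA]
          unfold pvCleanB
          simp only [show pvKLoop ('\n' :: t1) [] = 0 from rfl, List.take_zero, List.drop_zero,
            List.length_nil, List.length_cons, List.head?_cons,
            show pvSplitNl [] = [([] : List Char)] from rfl]
          rw [if_pos (by omega), if_pos (by omega), if_pos trivial]
          rw [ha]
          simp only [pvBump, List.drop_succ_cons, List.drop_zero]
          exact Prod.ext (by norm_num) rfl
      · have hx : pvExtract (c :: t1) ≠ pvExtract [] := by
          rw [pvExtract_cons c t1 hc]; simp [pvExtract]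
        rw [pvABody_head_ne (c :: t1) [] hx]
        unfold pvCleanB
        simp only [show pvKLoop (c :: t1) [] = 0 from rfl, List.take_zero, List.drop_zero,
          List.length_nil, List.length_cons, List.head?_cons,
          show pvSplitNl [] = [([] : List Char)] from rfl]
        rw [if_pos (by omega), if_pos (by omega), if_neg (by simpa using hc)]
        simp only [show ([([] : List Char)]).getLastD [] = [] from rfl, List.nil_append]
        exact Prod.ext (by norm_num) rfl
    | cons d t2 =>
      by_cases hcd : c = d
      · subst hcd
        have ht : t1 ≠ t2 := by simpa using h
        by_cases hc : c = '\n'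
        · subst hc
          rw [pvSplitNl_cons_nl, pvSplitNl_cons_nl,
            pvABody_step_nl _ _ (fun he => ht (pvSplitNl_inj he)),
            pvCleanB_step_nl, ih t2 ht]
        · rw [pvSplitNl_cons_ne c t1 hc, pvSplitNl_cons_ne c t2 hc]
          have hne : (pvSplitNl t1).headD [] :: (pvSplitNl t1).tail ≠
              (pvSplitNl t2).headD [] :: (pvSplitNl t2).tail := by
            rw [pvSplit_decomp, pvSplit_decomp]
            exact fun he => ht (pvSplitNl_inj he)
          rw [pvABody_step_c c _ _ _ _ hne, pvSplit_decomp, pvSplit_decomp, ih t2 ht,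
            pvCleanB_step_c c t1 t2 hc]
      · -- first characters differ: both sides report line 0
        have hk0 : pvKLoop (c :: t1) (d :: t2) = 0 := by simp [pvKLoop, hcd]
        rw [pvABody_head_ne _ _ (pvExtract_cons_ne t1 t2 hcd)]
        unfold pvCleanB
        rw [hk0]
        simp only [List.take_zero, List.drop_zero, List.length_cons,
          show pvSplitNl [] = [([] : List Char)] from rfl]
        rw [if_neg (by omega)]
        simp only [show ([([] : List Char)]).getLastD [] = [] from rfl, List.nil_append]
        exact Prod.ext (by norm_num) rfl

theorem first_differing_lines_eq_alt (s1 s2 : String) (h : s1 ≠ s2) :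
    first_differing_lines s1 s2 = first_differing_lines_alt s1 s2 := by
  have hl : s1.toList ≠ s2.toList := fun he => h (String.toList_inj.mp he)
  unfold first_differing_lines first_differing_lines_alt
  rw [pvSplitOn_eq, pvSplitOn_eq, pvMain _ _ hl, ← pvBBody_eq_clean]

-- ===== VERDICT (by name: the statement is the Claim_ definition above) =====
theorem first_differing_lines_spec : Claim_equal_first_differing_lines := by
  intro s1 s2 _ hpre
  unfold Spec_first_differing_lines
  exact first_differing_lines_eq_alt s1 s2 hpre
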